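-- pv_equiv track=rewrite | github.com/Krisje1973/AdventOfCode | 2023/Day06/code.py | getRecordBreaking
-- ===== SOURCE A (Python) =====
-- def getRecordBreaking(time,record):
--     result = []
--     resttime = time
--     speed = 0
--     br = False
--     for i in range(1,time):
--         resttime -= 1
--         speed += 1
--         if speed*resttime > record:
--             br = True
--             result.append(i)
--         elif br:
--             break
--
--     return result
-- ===== SOURCE B (Python) =====
-- def _isqrt(n):
--     # n >= 0: largest s with s*s <= n, by binary search
--     lo, hi = 0, n
--     while lo < hi:
--         mid = (lo + hi + 1) // 2
--         if mid * mid <= n: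
--             lo = mid
--         else:
--             hi = mid - 1
--     return lo
--
--
-- def getRecordBreaking(time, record):
--     # i*(time-i) > record  <=>  (2*i - time)^2 < time^2 - 4*record
--     d = time * time - 4 * record
--     if time <= 1 or d <= 0:
--         return []
--     s = _isqrt(d - 1)                    # largest s with s*s < d
--     lo = max(1, (time - s + 1) // 2)     # ceil((time - s) / 2)
--     hi = min(time - 1, (time + s) // 2)  # floor((time + s) / 2)
--     return list(range(lo, hi + 1))
-- ===== Notes on version B (the rewrite author's own statement) =====
-- stated objective: faster
-- what changed: Instead of simulating every hold time i in a loop, B solves the quadratic inequality i*(time-i) > record as (2i-time)^2 < time^2-4*record via an integer square root and emits the winning interval directly as one range.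
import Mathlib
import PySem

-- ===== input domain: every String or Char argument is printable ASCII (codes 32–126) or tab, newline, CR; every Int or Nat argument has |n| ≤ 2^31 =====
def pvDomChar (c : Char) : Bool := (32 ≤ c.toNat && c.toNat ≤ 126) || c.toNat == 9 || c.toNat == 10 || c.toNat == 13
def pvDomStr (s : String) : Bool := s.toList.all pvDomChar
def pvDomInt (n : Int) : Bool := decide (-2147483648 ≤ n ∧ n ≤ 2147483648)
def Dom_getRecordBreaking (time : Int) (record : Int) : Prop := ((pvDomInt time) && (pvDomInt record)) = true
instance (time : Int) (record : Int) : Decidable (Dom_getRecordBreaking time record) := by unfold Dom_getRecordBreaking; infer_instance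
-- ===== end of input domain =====

-- B replaces A's O(time) simulation loop by solving the quadratic i*(time-i) > record
-- with an integer square root and emitting the winning interval as one range (objective: faster).

-- ===== PORT A =====
-- A's for-loop with its break, carried state (resttime, speed, br, result) kept literally.
def getRecordBreakingLoop (record : Int) : List Int → Int → Int → Bool → List Int → List Int
  | [], _, _, _, result => result
  | i :: rest, resttime, speed, br, result =>
      let resttime' := resttime - 1
      let speed' := speed + 1
      if speed' * resttime' > record then
        getRecordBreakingLoop record rest resttime' speed' true (result ++ [i])
      else if br then result
      else getRecordBreakingLoop record rest resttime' speed' br result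

def getRecordBreaking (time : Int) (record : Int) : List Int :=
  getRecordBreakingLoop record (PySem.List.pyRange 1 time 1) time 0 false []

-- ===== PORT B =====
-- Source B's hand-written binary-search integer square root, literally.
def isqrtLoop (n : Int) (lo : Int) (hi : Int) : Int :=
  if h : lo < hi then
    let mid := PySem.Int.floordiv (lo + hi + 1) 2
    if mid * mid ≤ n then isqrtLoop n mid hi else isqrtLoop n lo (mid - 1)
  else lo
termination_by (hi - lo).toNat
decreasing_by
  · have hb := PySem.Int.floordiv_two_mid_bounds (lo := lo + 1) (hi := hi) (by omega)
    have e : lo + 1 + hi = lo + hi + 1 := by ring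
    rw [e] at hb
    omega
  · have hb := PySem.Int.floordiv_two_mid_bounds (lo := lo + 1) (hi := hi) (by omega)
    have e : lo + 1 + hi = lo + hi + 1 := by ring
    rw [e] at hb
    omega

def bIsqrt (n : Int) : Int := isqrtLoop n 0 n

def getRecordBreaking_alt (time : Int) (record : Int) : List Int :=
  let d := time * time - 4 * record
  if time ≤ 1 ∨ d ≤ 0 then []
  else
    let s := bIsqrt (d - 1)
    let lo := max 1 (PySem.Int.floordiv (time - s + 1) 2)
    let hi := min (time - 1) (PySem.Int.floordiv (time + s) 2)
    PySem.List.pyRange lo (hi + 1) 1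

-- ===== PRECONDITION & SPEC =====
def Spec_getRecordBreaking (time : Int) (record : Int) (out : List Int) : Prop := out = getRecordBreaking_alt time record
instance (time : Int) (record : Int) (out : List Int) : Decidable (Spec_getRecordBreaking time record out) := by unfold Spec_getRecordBreaking; infer_instance

-- ===== CLAIM (what is proved, stated in full; the proofs are below) =====
def Claim_equal_getRecordBreaking : Prop := ∀ (time : Int) (record : Int), Dom_getRecordBreaking time record → Spec_getRecordBreaking time record (getRecordBreaking time record)

-- ===== LEMMAS AND PROOFS =====

-- isqrtLoop maintains lo² ≤ n < (hi+1)² and 0 ≤ lo ≤ hi; its result r satisfies r² ≤ n < (r+1)² and 0 ≤ r.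
theorem isqrtLoop_step (n lo hi : Int) (h : lo < hi) :
    isqrtLoop n lo hi =
      (if PySem.Int.floordiv (lo + hi + 1) 2 * PySem.Int.floordiv (lo + hi + 1) 2 ≤ n
       then isqrtLoop n (PySem.Int.floordiv (lo + hi + 1) 2) hi
       else isqrtLoop n lo (PySem.Int.floordiv (lo + hi + 1) 2 - 1)) := by
  rw [isqrtLoop]
  simp [h]

theorem isqrtLoop_base (n lo hi : Int) (h : ¬ lo < hi) : isqrtLoop n lo hi = lo := by
  rw [isqrtLoop]
  simp [h]

theorem isqrtLoop_spec : ∀ (m : Nat) (n lo hi : Int), (hi - lo).toNat = m → 0 ≤ lo → lo ≤ hi →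
    lo * lo ≤ n → n < (hi + 1) * (hi + 1) →
    0 ≤ isqrtLoop n lo hi ∧ isqrtLoop n lo hi * isqrtLoop n lo hi ≤ n ∧
      n < (isqrtLoop n lo hi + 1) * (isqrtLoop n lo hi + 1) := by
  intro m
  induction m using Nat.strong_induction_on with
  | _ m ih =>
    intro n lo hi hm h0 hle hlo hhi
    by_cases h : lo < hi
    · have hb := PySem.Int.floordiv_two_mid_bounds (lo := lo + 1) (hi := hi) (by omega)
      have e : lo + 1 + hi = lo + hi + 1 := by ring
      rw [e] at hb
      rw [isqrtLoop_step n lo hi h]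
      by_cases hmid : PySem.Int.floordiv (lo + hi + 1) 2 * PySem.Int.floordiv (lo + hi + 1) 2 ≤ n
      · rw [if_pos hmid]
        exact ih (hi - PySem.Int.floordiv (lo + hi + 1) 2).toNat (by omega) n _ hi rfl
          (by omega) (by omega) hmid hhi
      · rw [if_neg hmid]
        refine ih (PySem.Int.floordiv (lo + hi + 1) 2 - 1 - lo).toNat (by omega) n lo _ rfl
          h0 (by omega) hlo ?_
        have e2 : PySem.Int.floordiv (lo + hi + 1) 2 - 1 + 1 = PySem.Int.floordiv (lo + hi + 1) 2 := by ring
        rw [e2]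
        omega
    · rw [isqrtLoop_base n lo hi h]
      have e : lo = hi := by omega
      subst e
      exact ⟨h0, hlo, hhi⟩

theorem bIsqrt_spec (n : Int) (hn : 0 ≤ n) :
    0 ≤ bIsqrt n ∧ bIsqrt n * bIsqrt n ≤ n ∧ n < (bIsqrt n + 1) * (bIsqrt n + 1) := by
  have := isqrtLoop_spec (n - 0).toNat n 0 n rfl (le_refl 0) hn (by omega) (by nlinarith)
  simpa [bIsqrt] using this

-- The master loop lemma: if membership in the record-beating set is exactly the interval [lo', hi'],
-- A's loop over range(a, time) appends exactly that interval clipped to [a, time).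
theorem loop_interval (record time lo' hi' : Int)
    (hp : ∀ i : Int, record < i * (time - i) ↔ (lo' ≤ i ∧ i ≤ hi')) :
    ∀ (m : Nat) (a : Int) (br : Bool) (res : List Int), (time - a).toNat = m →
    (br = true → (lo' ≤ a - 1 ∧ a - 1 ≤ hi')) →
    getRecordBreakingLoop record (PySem.List.pyRange a time 1) (time - (a - 1)) (a - 1) br res
      = res ++ PySem.List.pyRange (max a lo') (min time (hi' + 1)) 1 := by
  intro m
  induction m with
  | zero =>
      intro a br res hm hbr
      have ha : time ≤ a := by omega
      rw [PySem.List.pyRange_one_eq_nil ha, PySem.List.pyRange_one_eq_nil (by omega)]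
      simp [getRecordBreakingLoop]
  | succ k ih =>
      intro a br res hm hbr
      have ha : a < time := by omega
      rw [PySem.List.pyRange_one_cons ha]
      simp only [getRecordBreakingLoop]
      have hstate : time - (a - 1) - 1 = time - a := by ring
      have hspeed : a - 1 + 1 = a := by ring
      rw [hstate, hspeed]
      by_cases hc : record < a * (time - a)
      · rw [if_pos hc]
        have hmem : lo' ≤ a ∧ a ≤ hi' := (hp a).mp hc
        have h1 : time - (a + 1 - 1) = time - a := by ring
        have h2 : a + 1 - 1 = a := by ring
        have := ih (a + 1) true (res ++ [a]) (by omega) (by intro _; omega)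
        rw [h1, h2] at this
        rw [this]
        have hmax : max a lo' = a := by omega
        have hmax' : max (a + 1) lo' = a + 1 := by omega
        have hmin : a < min time (hi' + 1) := by omega
        rw [hmax, hmax', PySem.List.pyRange_one_cons hmin]
        simp
      · rw [if_neg hc]
        have hfail : ¬ (lo' ≤ a ∧ a ≤ hi') := fun hmem => hc ((hp a).mpr hmem)
        cases br with
        | true =>
            rw [if_pos rfl]
            have hprev := hbr rfl
            have hhi : hi' < a := by
              by_contra hx
              push Not at hx
              exact hfail ⟨by omega, by omega⟩
            rw [PySem.List.pyRange_one_eq_nil (by omega)]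
            simp
        | false =>
            rw [if_neg Bool.false_ne_true]
            have h1 : time - (a + 1 - 1) = time - a := by ring
            have h2 : a + 1 - 1 = a := by ring
            have := ih (a + 1) false res (by omega) (by intro h; exact absurd h (by simp))
            rw [h1, h2] at this
            rw [this]
            by_cases hlt : a < lo'
            · have hm2 : max (a + 1) lo' = max a lo' := by omega
              rw [hm2]
            · have hhi : hi' < a := by
                by_contra hx
                push Not at hx
                exact hfail ⟨by omega, by omega⟩
              rw [PySem.List.pyRange_one_eq_nil (by omega), PySem.List.pyRange_one_eq_nil (by omega)]

-- floordiv bracket helpers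
theorem floordiv2_le_iff (x i : Int) : PySem.Int.floordiv x 2 ≤ i ↔ x < (i + 1) * 2 := by
  constructor
  · intro h
    have := (PySem.Int.floordiv_lt_iff_lt_mul (a := x) (b := 2) (q := i + 1) (by omega)).mp (by omega)
    exact this
  · intro h
    have := (PySem.Int.floordiv_lt_iff_lt_mul (a := x) (b := 2) (q := i + 1) (by omega)).mpr h
    omega

theorem lt_floordiv2_iff (x i : Int) : i < PySem.Int.floordiv x 2 ↔ (i + 1) * 2 ≤ x := by
  constructor
  · intro h
    have := (PySem.Int.le_floordiv_iff_mul_le (a := x) (b := 2) (q := i + 1) (by omega)).mp (by omega)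
    omega
  · intro h
    have := (PySem.Int.le_floordiv_iff_mul_le (a := x) (b := 2) (q := i + 1) (by omega)).mpr h
    omega

-- On the main branch, the record-beating set is exactly [lo', hi'] for B's computed bounds.
theorem char_interval (time record s : Int) (_hd : 0 < time * time - 4 * record)
    (hs0 : 0 ≤ s) (hs1 : s * s ≤ time * time - 4 * record - 1)
    (hs2 : time * time - 4 * record - 1 < (s + 1) * (s + 1)) :
    ∀ i : Int, record < i * (time - i) ↔
      (PySem.Int.floordiv (time - s + 1) 2 ≤ i ∧ i ≤ PySem.Int.floordiv (time + s) 2) := by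
  intro i
  have key : record < i * (time - i) ↔ ((2 * i - time) * (2 * i - time) < time * time - 4 * record) := by
    constructor <;> intro h <;> nlinarith
  have abs_iff : ((2 * i - time) * (2 * i - time) < time * time - 4 * record) ↔ (-s ≤ 2 * i - time ∧ 2 * i - time ≤ s) := by
    constructor
    · intro h
      constructor
      · by_contra hx
        push Not at hx
        nlinarith
      · by_contra hx
        push Not at hx
        nlinarith
    · intro ⟨h1, h2⟩
      nlinarith
  have lo_iff : PySem.Int.floordiv (time - s + 1) 2 ≤ i ↔ -s ≤ 2 * i - time := by
    rw [floordiv2_le_iff]; omega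
  have hi_iff : i ≤ PySem.Int.floordiv (time + s) 2 ↔ 2 * i - time ≤ s := by
    constructor
    · intro h
      by_contra hx
      have : i - 1 < PySem.Int.floordiv (time + s) 2 := by omega
      have := (lt_floordiv2_iff (time + s) (i - 1)).mp this
      omega
    · intro h
      by_contra hx
      have := (lt_floordiv2_iff (time + s) (PySem.Int.floordiv (time + s) 2)).mpr (by omega)
      omega
  rw [key, abs_iff, lo_iff, hi_iff]

-- When d ≤ 0 every hold time fails the record test.
theorem char_empty (time record : Int) (hd : time * time - 4 * record ≤ 0) :
    ∀ i : Int, record < i * (time - i) ↔ ((1 : Int) ≤ i ∧ i ≤ 0) := by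
  intro i
  constructor
  · intro h; nlinarith [sq_nonneg (2 * i - time)]
  · omega

-- ===== VERDICT (by name: the statement is the Claim_ definition above) =====
theorem getRecordBreaking_spec : Claim_equal_getRecordBreaking := by
  unfold Claim_equal_getRecordBreaking Spec_getRecordBreaking
  intro time record _
  unfold getRecordBreaking getRecordBreaking_alt
  by_cases hmain : time ≤ 1 ∨ time * time - 4 * record ≤ 0
  · rw [if_pos hmain]
    rcases hmain with ht | hd
    · rw [PySem.List.pyRange_one_eq_nil ht]
      simp [getRecordBreakingLoop]
    · have := loop_interval record time 1 0 (char_empty time record hd)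
        (time - 1).toNat 1 false [] rfl (by intro h; exact absurd h (by simp))
      have e : time - (1 - 1 : Int) = time := by ring
      rw [e] at this
      have e2 : (1 : Int) - 1 = 0 := by ring
      rw [e2] at this
      rw [this]
      rw [PySem.List.pyRange_one_eq_nil (by omega)]
      simp
  · rw [if_neg hmain]
    push Not at hmain
    obtain ⟨ht, hd⟩ := hmain
    set d := time * time - 4 * record with hdd
    set s := bIsqrt (d - 1) with hss
    obtain ⟨hs0, hs1, hs2⟩ := bIsqrt_spec (d - 1) (by omega)
    have hchar := char_interval time record s (by omega) hs0 (by omega) (by omega)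
    have := loop_interval record time (PySem.Int.floordiv (time - s + 1) 2)
      (PySem.Int.floordiv (time + s) 2) hchar
      (time - 1).toNat 1 false [] rfl (by intro h; exact absurd h (by simp))
    have e : time - (1 - 1 : Int) = time := by ring
    rw [e] at this
    have e2 : (1 : Int) - 1 = 0 := by ring
    rw [e2] at this
    rw [this]
    have emin : min time (PySem.Int.floordiv (time + s) 2 + 1)
        = min (time - 1) (PySem.Int.floordiv (time + s) 2) + 1 := by omega
    rw [emin]
    simp
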